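-- pv_equiv track=rewrite | github.com/AdeptAIPro/kempian-backend- | app/search/adeptai_components/behavioural_analysis/pipeline.py | _create_skill_development_path
-- ===== SOURCE A (Python) =====
-- from typing import Dict, Any, List, Optional, Tuple
--
-- def _create_skill_development_path(skill_gaps: List[str]) -> List[str]:
--     """Create ordered skill development path"""
--     # Priority order based on typical career progression
--     priority_order = [
--         "technical leadership",
--         "team collaboration",
--         "strategic thinking",
--         "business acumen",
--         "people development"
--     ]
--
--     development_path = []
--     for priority in priority_order:
--         matching_gaps = [gap for gap in skill_gaps if priority in gap.lower()]
--         development_path.extend(matching_gaps[:1])  # Add one per category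
--
--     return development_path
-- ===== SOURCE B (Python) =====
-- def _create_skill_development_path(skill_gaps):
--     """Create ordered skill development path"""
--     priority_order = [
--         "technical leadership",
--         "team collaboration",
--         "strategic thinking",
--         "business acumen",
--         "people development"
--     ]
--     # One pass over skill_gaps: record, per priority category, the FIRST gap containing it.
--     first_match = {}
--     for gap in skill_gaps:
--         g = gap.lower()
--         for priority in priority_order:
--             if priority not in first_match and priority in g:
--                 first_match[priority] = gap
--     return [first_match[p] for p in priority_order if p in first_match]
-- ===== Notes on version B (the rewrite author's own statement) =====
-- stated objective: alternative
-- what changed: Replaces one filtering scan of skill_gaps per priority category (5 passes, each building a full match list and truncating it) with a single pass over skill_gaps that records in a dict the first gap matching each category, followed by an emission loop over the priority order; avoids building the intermediate match lists.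
import Mathlib
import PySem

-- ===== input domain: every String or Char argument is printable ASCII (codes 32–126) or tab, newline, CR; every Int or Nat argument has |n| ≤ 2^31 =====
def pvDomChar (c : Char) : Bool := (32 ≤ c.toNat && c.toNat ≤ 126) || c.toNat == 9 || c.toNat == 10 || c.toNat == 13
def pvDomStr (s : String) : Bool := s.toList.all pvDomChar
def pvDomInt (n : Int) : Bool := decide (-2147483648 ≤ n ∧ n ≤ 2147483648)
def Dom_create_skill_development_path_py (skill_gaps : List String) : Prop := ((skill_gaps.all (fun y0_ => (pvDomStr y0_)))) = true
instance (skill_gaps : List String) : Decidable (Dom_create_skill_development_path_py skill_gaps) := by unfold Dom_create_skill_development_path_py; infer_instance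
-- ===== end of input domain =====

-- B replaces one filtering scan of skill_gaps per priority category with a single pass
-- building a first-match dict, then emits in priority order (alternative decomposition; no speed claimed).

def pvPriorityOrder : List String :=
  ["technical leadership", "team collaboration", "strategic thinking",
   "business acumen", "people development"]

-- ===== PORT A =====
-- for each priority: filter skill_gaps by substring-of-lowercase, extend path with the first match
def create_skill_development_path_py (skill_gaps : List String) : List String :=
  pvPriorityOrder.foldl
    (fun path priority =>
      path ++ (skill_gaps.filter (fun gap => PySem.Str.isIn priority (PySem.Str.lower gap))).take 1)
    []

-- ===== PORT B =====
-- one pass over skill_gaps: record first matching gap per category, unless already recorded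
def pvRecordGap (d : PySem.Dict String String) (gap : String) : PySem.Dict String String :=
  let g := PySem.Str.lower gap
  pvPriorityOrder.foldl
    (fun d priority =>
      if !(d.contains priority) && PySem.Str.isIn priority g then d.insert priority gap else d)
    d

def create_skill_development_path_py_alt (skill_gaps : List String) : List String :=
  let first_match := skill_gaps.foldl pvRecordGap PySem.Dict.empty
  pvPriorityOrder.filterMap (fun p => first_match.get? p)

-- ===== PRECONDITION & SPEC =====
def Spec_create_skill_development_path_py (skill_gaps : List String) (out : List String) : Prop := out = create_skill_development_path_py_alt skill_gaps
instance (skill_gaps : List String) (out : List String) : Decidable (Spec_create_skill_development_path_py skill_gaps out) := by unfold Spec_create_skill_development_path_py; infer_instance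

-- ===== CLAIM (what is proved, stated in full; the proofs are below) =====
def Claim_equal_create_skill_development_path_py : Prop := ∀ (skill_gaps : List String), Dom_create_skill_development_path_py skill_gaps → Spec_create_skill_development_path_py skill_gaps (create_skill_development_path_py skill_gaps)

-- ===== LEMMAS AND PROOFS =====

-- the first element of a filtered list is find?
lemma filter_take_one {α : Type} (q : α → Bool) (xs : List α) :
    (xs.filter q).take 1 = (xs.find? q).toList := by
  induction xs with
  | nil => rfl
  | cons x xs ih =>
    by_cases h : q x = true
    · simp [h]
    · simp only [Bool.not_eq_true] at h
      simp [h, ih]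

-- effect of one gap's inner fold on a lookup
lemma record_get (ps : List String) (d : PySem.Dict String String) (gap q : String) :
    (ps.foldl
      (fun d priority =>
        if !(d.contains priority) && PySem.Str.isIn priority (PySem.Str.lower gap)
        then d.insert priority gap else d) d).get? q =
      if q ∈ ps ∧ d.get? q = none ∧ PySem.Str.isIn q (PySem.Str.lower gap) = true
      then some gap else d.get? q := by
  induction ps generalizing d with
  | nil => simp
  | cons p ps ih =>
    simp only [List.foldl_cons, ih]
    by_cases hpq : q = p
    · subst hpq
      by_cases hc : d.contains q = true
      · have hg : d.get? q ≠ none := by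
          intro h
          rw [PySem.Dict.get?_eq_none_iff_contains] at h
          simp [hc] at h
        simp [hc, hg]
      · simp only [Bool.not_eq_true] at hc
        have hg : d.get? q = none := by
          rw [PySem.Dict.get?_eq_none_iff_contains]; simp [hc]
        by_cases hin : PySem.Str.isIn q (PySem.Str.lower gap) = true
        all_goals simp only [PySem.Str.isIn_eq, PySem.Str.toList_lower] at hin
        · simp [hc, hg, hin]
        · simp [hc, hin, hg]
    · by_cases hcond : (!(d.contains p) && PySem.Str.isIn p (PySem.Str.lower gap)) = true
      · simp only [hcond, if_true, PySem.Dict.get?_insert_of_ne _ _ hpq]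
        by_cases hqps : q ∈ ps
        · simp [hpq, hqps]
        · simp [hpq, hqps]
      · simp only [hcond]
        simp [hpq]

-- the full single pass computes find? for any priority key
lemma fold_get (xs : List String) (d : PySem.Dict String String) (q : String)
    (hq : q ∈ pvPriorityOrder) :
    (xs.foldl pvRecordGap d).get? q =
      (d.get? q).or (xs.find? (fun g => PySem.Str.isIn q (PySem.Str.lower g))) := by
  induction xs generalizing d with
  | nil => simp
  | cons g xs ih =>
    simp only [List.foldl_cons, ih]
    have hrec := record_get pvPriorityOrder d g q
    simp only [pvRecordGap]
    rw [hrec]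
    cases hd : d.get? q with
    | some v =>
      simp [List.find?_cons]
    | none =>
      by_cases hin : PySem.Str.isIn q (PySem.Str.lower g) = true
      all_goals simp only [PySem.Str.isIn_eq, PySem.Str.toList_lower] at hin
      · simp [hq, hin]
      · simp [hq, hin]

-- ===== VERDICT (by name: the statement is the Claim_ definition above) =====
theorem create_skill_development_path_py_spec : Claim_equal_create_skill_development_path_py := by
  intro skill_gaps _
  show _ = _
  unfold create_skill_development_path_py create_skill_development_path_py_alt
  have h : ∀ q ∈ pvPriorityOrder,
      (skill_gaps.foldl pvRecordGap PySem.Dict.empty).get? q =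
        skill_gaps.find? (fun g => PySem.Str.isIn q (PySem.Str.lower g)) := by
    intro q hq
    rw [fold_get skill_gaps PySem.Dict.empty q hq]
    simp
  simp only [pvPriorityOrder] at h ⊢
  simp only [List.foldl_cons, List.foldl_nil, List.filterMap_cons, List.filterMap_nil,
    filter_take_one]
  rw [h "technical leadership" (by simp),
      h "team collaboration" (by simp),
      h "strategic thinking" (by simp),
      h "business acumen" (by simp),
      h "people development" (by simp)]
  cases skill_gaps.find? (fun g => PySem.Str.isIn "technical leadership" (PySem.Str.lower g)) <;>
  cases skill_gaps.find? (fun g => PySem.Str.isIn "team collaboration" (PySem.Str.lower g)) <;>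
  cases skill_gaps.find? (fun g => PySem.Str.isIn "strategic thinking" (PySem.Str.lower g)) <;>
  cases skill_gaps.find? (fun g => PySem.Str.isIn "business acumen" (PySem.Str.lower g)) <;>
  cases skill_gaps.find? (fun g => PySem.Str.isIn "people development" (PySem.Str.lower g)) <;>
  simp
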